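-- pv_equiv track=rewrite | github.com/I-XaR-I/Secure-Messenger | security/aes_encrypt_optim.py | divide_list
-- ===== SOURCE A (Python) =====
-- def divide_list(input_list, bytes_per_word=4, words_per_group=4):
--     words = [
--         input_list[i : i + bytes_per_word]
--         for i in range(0, len(input_list), bytes_per_word)
--     ]
--     groups = [
--         words[i : i + words_per_group] for i in range(0, len(words), words_per_group)
--     ]
--     return groups
-- ===== SOURCE B (Python) =====
-- def divide_list(input_list, bytes_per_word=4, words_per_group=4):
--     if bytes_per_word <= 0 or words_per_group <= 0:
--         return []
--     groups = []
--     rest = input_list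
--     while rest:
--         group = []
--         for _ in range(words_per_group):
--             if not rest:
--                 break
--             group.append(rest[:bytes_per_word])
--             rest = rest[bytes_per_word:]
--         groups.append(group)
--     return groups
-- ===== Notes on version B (the rewrite author's own statement) =====
-- stated objective: alternative
-- what changed: B replaces A's two staged index-range slicing comprehensions with a single while loop that consumes the list by take/drop, peeling one word at a time into the current group via a counted inner loop and an accumulator, behind a positivity guard its loop needs to terminate.
import Mathlib
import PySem

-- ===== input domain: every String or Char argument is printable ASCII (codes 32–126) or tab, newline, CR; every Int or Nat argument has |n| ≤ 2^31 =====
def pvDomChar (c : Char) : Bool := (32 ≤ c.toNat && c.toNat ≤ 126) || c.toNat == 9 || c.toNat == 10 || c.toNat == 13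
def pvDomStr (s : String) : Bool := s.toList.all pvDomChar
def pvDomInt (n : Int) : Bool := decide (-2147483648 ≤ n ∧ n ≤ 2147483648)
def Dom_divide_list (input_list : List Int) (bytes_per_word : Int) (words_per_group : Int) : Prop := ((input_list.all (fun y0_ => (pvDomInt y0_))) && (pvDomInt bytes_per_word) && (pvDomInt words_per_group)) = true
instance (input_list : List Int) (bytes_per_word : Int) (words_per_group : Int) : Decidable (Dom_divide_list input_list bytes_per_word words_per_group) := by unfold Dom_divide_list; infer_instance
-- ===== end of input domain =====

-- B consumes the list with a while loop and take/drop accumulators, peeling one word at a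
-- time into the current group, instead of A's two staged index-range slicing comprehensions;
-- same return value on the stated precondition (objective: alternative).


-- ===== PORT A =====
def divide_list (input_list : List Int) (bytes_per_word : Int) (words_per_group : Int) : List (List (List Int)) :=
  let words : List (List Int) :=
    (PySem.List.pyRange 0 (input_list.length : Int) bytes_per_word).map
      (fun i => PySem.List.slice input_list (some i) (some (i + bytes_per_word)))
  let groups : List (List (List Int)) :=
    (PySem.List.pyRange 0 (words.length : Int) words_per_group).map
      (fun i => PySem.List.slice words (some i) (some (i + words_per_group)))
  groups

-- ===== PORT B =====
-- inner 'for _ in range(words_per_group)' loop of Source B: peels up to wn words of size b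
-- off rest, returning (the group built so far, the remaining list)
def pvAltInner (b : Int) : Nat → List Int → List (List Int) × List Int
  | 0, rest => ([], rest)
  | k + 1, rest =>
      if rest = [] then ([], rest)
      else
        let word := PySem.List.slice rest none (some b)
        let rest' := PySem.List.slice rest (some b) none
        let p := pvAltInner b k rest'
        (word :: p.1, p.2)

-- outer 'while rest' loop of Source B; fuel = the initial list length makes it total (with
-- 0 < b each iteration consumes at least one element, so the fuel is never exhausted)
def pvAltOuter (b : Int) (wn : Nat) : Nat → List Int → List (List (List Int))
  | _, [] => []
  | 0, _ :: _ => []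
  | fuel + 1, x :: t =>
      let p := pvAltInner b wn (x :: t)
      p.1 :: pvAltOuter b wn fuel p.2

-- Source B's positivity guard (needed for the while loop to terminate), then the loop
def divide_list_alt (input_list : List Int) (bytes_per_word : Int) (words_per_group : Int) : List (List (List Int)) :=
  if bytes_per_word ≤ 0 ∨ words_per_group ≤ 0 then []
  else pvAltOuter bytes_per_word words_per_group.toNat input_list.length input_list

-- ===== PRECONDITION & SPEC =====
-- Pre_ excludes only bytes_per_word = 0 and words_per_group = 0, exactly where A raises
-- ValueError (range() step 0); everywhere else A returns and B matches it.
def Pre_divide_list (input_list : List Int) (bytes_per_word : Int) (words_per_group : Int) : Prop :=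
  bytes_per_word ≠ 0 ∧ words_per_group ≠ 0
instance (input_list : List Int) (bytes_per_word : Int) (words_per_group : Int) : Decidable (Pre_divide_list input_list bytes_per_word words_per_group) := by unfold Pre_divide_list; infer_instance

def pvWitness_divide_list : List Int × Int × Int := ([1, 2, 3, 4, 5, 6, 7, 8, 9], 2, 2)

def Spec_divide_list (input_list : List Int) (bytes_per_word : Int) (words_per_group : Int) (out : List (List (List Int))) : Prop := out = divide_list_alt input_list bytes_per_word words_per_group
instance (input_list : List Int) (bytes_per_word : Int) (words_per_group : Int) (out : List (List (List Int))) : Decidable (Spec_divide_list input_list bytes_per_word words_per_group out) := by unfold Spec_divide_list; infer_instance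

-- ===== CLAIM (what is proved, stated in full; the proofs are below) =====
def Claim_equal_divide_list : Prop := ∀ (input_list : List Int) (bytes_per_word : Int) (words_per_group : Int), Dom_divide_list input_list bytes_per_word words_per_group → Pre_divide_list input_list bytes_per_word words_per_group → Spec_divide_list input_list bytes_per_word words_per_group (divide_list input_list bytes_per_word words_per_group)

-- ===== LEMMAS AND PROOFS =====
def pvChunks {α : Type} (k : Nat) : List α → List (List α)
  | [] => []
  | x :: xs => (x :: xs.take k) :: pvChunks k (xs.drop k)
  termination_by xs => xs.length
  decreasing_by simp
theorem pvChunks_nil {α : Type} (k : Nat) : pvChunks k ([] : List α) = [] := by simp [pvChunks]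
theorem pvChunks_cons {α : Type} (k : Nat) (xs : List α) (h : xs ≠ []) :
    pvChunks k xs = xs.take (k + 1) :: pvChunks k (xs.drop (k + 1)) := by
  cases xs with
  | nil => exact absurd rfl h
  | cons x t => rw [pvChunks]; simp
theorem pvRange_nil_of_pos {a b s : Int} (hs : 0 < s) (h : b ≤ a) :
    PySem.List.pyRange a b s = [] := by
  rw [PySem.List.pyRange_of_pos a b hs]; simp [show ¬ a < b by omega]
theorem pvRange_nil_of_neg {a b s : Int} (hs : s < 0) (h : a ≤ b) :
    PySem.List.pyRange a b s = [] := by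
  unfold PySem.List.pyRange
  simp [show ¬ s = 0 by omega, show ¬ 0 < s by omega, show ¬ b < a by omega]
theorem pvRange_self {a s : Int} : PySem.List.pyRange a a s = [] := by
  unfold PySem.List.pyRange
  rcases lt_trichotomy s 0 with h | h | h <;> simp [h]
theorem pvRange_cons {a b s : Int} (hs : 0 < s) (h : a < b) :
    PySem.List.pyRange a b s = a :: PySem.List.pyRange (a + s) b s := by
  rw [PySem.List.pyRange_of_pos a b hs, PySem.List.pyRange_of_pos (a+s) b hs]
  rw [if_pos h]
  have hcount : ((b - a + s - 1) / s).toNat = (if a + s < b then ((b - (a+s) + s - 1) / s).toNat else 0) + 1 := by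
    by_cases h2 : a + s < b
    · rw [if_pos h2]
      have : b - a + s - 1 = (b - (a + s) + s - 1) + 1 * s := by ring
      rw [this, Int.add_mul_ediv_right _ _ (by omega : s ≠ 0)]
      have h3 : 0 ≤ (b - (a + s) + s - 1) / s := by
        apply Int.ediv_nonneg <;> omega
      omega
    · rw [if_neg h2]
      have h1 : (b - a + s - 1) / s = 1 := by
        have : b - a + s - 1 = (b - a - 1) + 1 * s := by ring
        rw [this, Int.add_mul_ediv_right _ _ (by omega : s ≠ 0)]
        rw [Int.ediv_eq_zero_of_lt (by omega) (by omega)]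
        omega
      rw [h1]; simp
  rw [hcount, List.range_succ_eq_map]
  simp [List.map_map, Function.comp]
  intro k _
  ring
theorem pvRange_shift (a b s c : Int) (hs : 0 < s) :
    PySem.List.pyRange (a + c) (b + c) s = (PySem.List.pyRange a b s).map (· + c) := by
  rw [PySem.List.pyRange_of_pos _ _ hs, PySem.List.pyRange_of_pos _ _ hs]
  have : b + c - (a + c) = b - a := by ring
  rw [this]
  simp only [show ∀ x y : Int, (x + c < y + c) = (x < y) from fun x y => by simp, List.map_map]
  congr 1
  funext k
  simp; ring
theorem pvSlices_eq_chunks {α : Type} (b : Int) (hb : 0 < b) (xs : List α) :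
    (PySem.List.pyRange 0 (xs.length : Int) b).map
      (fun i => PySem.List.slice xs (some i) (some (i + b))) = pvChunks (b.toNat - 1) xs := by
  have main : ∀ (n : Nat) (ys : List α), ys.length ≤ n →
      (PySem.List.pyRange 0 (ys.length : Int) b).map
        (fun i => PySem.List.slice ys (some i) (some (i + b))) = pvChunks (b.toNat - 1) ys := by
    intro n
    induction n with
    | zero =>
      intro ys hy
      have : ys = [] := List.length_eq_zero_iff.mp (by omega)
      subst this
      simp [pvRange_self, pvChunks_nil]
    | succ n ih =>
      intro ys hy
      cases ys with
      | nil => simp [pvRange_self, pvChunks_nil]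
      | cons x t =>
        have hL : (0 : Int) < ((x :: t).length : Int) := by
          simp
        rw [pvRange_cons hb hL, List.map_cons, zero_add]
        have hhead : PySem.List.slice (x :: t) (some 0) (some b) = (x :: t).take b.toNat := by
          rw [PySem.List.slice_zero_start, PySem.List.slice_to _ (by omega)]
        rw [hhead, pvChunks_cons _ _ (by simp), show b.toNat - 1 + 1 = b.toNat by omega]
        congr 1
        have hshift : PySem.List.pyRange b ((x :: t).length : Int) b
            = (PySem.List.pyRange 0 (((x :: t).length : Int) - b) b).map (· + b) := by
          have := pvRange_shift 0 (((x :: t).length : Int) - b) b b hb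
          simpa using this
        rw [hshift, List.map_map]
        by_cases hbig : b ≤ ((x :: t).length : Int)
        · have hdl : (((x :: t).drop b.toNat).length : Int) = ((x :: t).length : Int) - b := by
            have h1 : b.toNat ≤ (x :: t).length := by
              have h2 := hbig
              simp only [List.length_cons] at h2 ⊢
              omega
            rw [List.length_drop, Nat.cast_sub h1, Int.toNat_of_nonneg hb.le]
          have hcongr : ∀ i ∈ PySem.List.pyRange 0 (((x :: t).length : Int) - b) b,
              ((fun i => PySem.List.slice (x :: t) (some i) (some (i + b))) ∘ (· + b)) i
                = PySem.List.slice ((x :: t).drop b.toNat) (some i) (some (i + b)) := by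
            intro i hi
            have hi0 : 0 ≤ i := ((PySem.List.mem_pyRange_iff_of_pos hb i).mp hi).1
            simp only [Function.comp]
            rw [PySem.List.slice_toNat _ (by omega) (by omega),
                PySem.List.slice_toNat _ (by omega) (by omega),
                List.drop_drop]
            congr 1
            · omega
            · congr 1
              omega
          rw [List.map_congr_left hcongr, ← hdl]
          exact ih _ (by simp only [List.length_drop, List.length_cons] at hy ⊢; omega)
        · have h1 : PySem.List.pyRange 0 (((x :: t).length : Int) - b) b = [] :=
            pvRange_nil_of_pos hb (by omega)
          have h2 : (x :: t).drop b.toNat = [] := by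
            apply List.drop_eq_nil_of_le
            omega
          rw [h1, h2, pvChunks_nil, List.map_nil]
  exact main xs.length xs le_rfl
theorem pvChunks_take {α : Type} (k m : Nat) (xs : List α) :
    pvChunks k (xs.take ((k + 1) * m)) = (pvChunks k xs).take m := by
  induction m generalizing xs with
  | zero => simp [pvChunks_nil]
  | succ m ih =>
    cases xs with
    | nil => simp [pvChunks_nil]
    | cons x t =>
      have hne : (x :: t).take ((k + 1) * (m + 1)) ≠ [] := by
        simp [List.take_eq_nil_iff]
      rw [pvChunks_cons _ _ hne, pvChunks_cons k (x :: t) (by simp), List.take_succ_cons]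
      congr 1
      · rw [List.take_take]
        congr 1
        exact Nat.min_eq_left (by nlinarith)
      · rw [List.drop_take, ← ih]
        congr 2
        rw [Nat.mul_succ]
        omega
theorem pvChunks_drop {α : Type} (k m : Nat) (xs : List α) :
    pvChunks k (xs.drop ((k + 1) * m)) = (pvChunks k xs).drop m := by
  induction m generalizing xs with
  | zero => simp
  | succ m ih =>
    cases xs with
    | nil => simp [pvChunks_nil]
    | cons x t =>
      have h1 : (k + 1) * (m + 1) = (k + 1) + (k + 1) * m := by ring
      rw [h1, ← List.drop_drop, ih, pvChunks_cons k (x :: t) (by simp)]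
      rw [List.drop_succ_cons]
      simp

theorem pvA_pos (xs : List Int) (b w : Int) (hb : 0 < b) (hw : 0 < w) :
    divide_list xs b w = pvChunks (w.toNat - 1) (pvChunks (b.toNat - 1) xs) := by
  unfold divide_list
  simp only [pvSlices_eq_chunks b hb xs, pvSlices_eq_chunks w hw]

theorem pvAltInner_eq (b : Int) (hb : 0 < b) (wn : Nat) (rest : List Int) :
    pvAltInner b wn rest
      = (pvChunks (b.toNat - 1) (rest.take (b.toNat * wn)), rest.drop (b.toNat * wn)) := by
  induction wn generalizing rest with
  | zero => simp [pvAltInner, pvChunks_nil]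
  | succ k ih =>
    cases rest with
    | nil => simp [pvAltInner, pvChunks_nil]
    | cons x t =>
      rw [pvAltInner, if_neg (by simp)]
      simp only [PySem.List.slice_to _ hb.le, PySem.List.slice_from _ hb.le, ih]
      have hne : (x :: t).take (b.toNat * (k + 1)) ≠ [] := by
        simp [List.take_eq_nil_iff]
        omega
      rw [pvChunks_cons _ _ hne, show b.toNat - 1 + 1 = b.toNat by omega]
      have hM : b.toNat * (k + 1) = b.toNat + b.toNat * k := by ring
      have e1 : ((x :: t).take (b.toNat * (k + 1))).take b.toNat = (x :: t).take b.toNat := by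
        rw [List.take_take]
        congr 1
        omega
      have e2 : ((x :: t).take (b.toNat * (k + 1))).drop b.toNat
          = ((x :: t).drop b.toNat).take (b.toNat * k) := by
        rw [List.drop_take]
        congr 1
        omega
      have e3 : ((x :: t).drop b.toNat).drop (b.toNat * k) = (x :: t).drop (b.toNat * (k + 1)) := by
        rw [List.drop_drop]
        congr 1
        omega
      rw [e1, e2, e3]

theorem pvAltOuter_eq (b w : Int) (hb : 0 < b) (hw : 0 < w) :
    ∀ (fuel : Nat) (rest : List Int), rest.length ≤ fuel →
      pvAltOuter b w.toNat fuel rest = pvChunks (w.toNat - 1) (pvChunks (b.toNat - 1) rest) := by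
  intro fuel
  induction fuel with
  | zero =>
    intro rest hr
    have : rest = [] := List.length_eq_zero_iff.mp (by omega)
    subst this
    simp [pvAltOuter, pvChunks_nil]
  | succ f ih =>
    intro rest hr
    cases rest with
    | nil => simp [pvAltOuter, pvChunks_nil]
    | cons x t =>
      rw [pvAltOuter]
      simp only [pvAltInner_eq b hb]
      have hM : 1 ≤ b.toNat * w.toNat := by
        have : 1 ≤ b.toNat := by omega
        have : 1 ≤ w.toNat := by omega
        nlinarith
      rw [ih ((x :: t).drop (b.toNat * w.toNat)) (by
        simp only [List.length_drop, List.length_cons] at hr ⊢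
        omega)]
      have hwordsne : pvChunks (b.toNat - 1) (x :: t) ≠ [] := by
        rw [pvChunks_cons _ _ (by simp)]; simp
      rw [pvChunks_cons (w.toNat - 1) _ hwordsne, show w.toNat - 1 + 1 = w.toNat by omega]
      have hkb : b.toNat - 1 + 1 = b.toNat := by omega
      have e1 : pvChunks (b.toNat - 1) ((x :: t).take (b.toNat * w.toNat))
          = (pvChunks (b.toNat - 1) (x :: t)).take w.toNat := by
        have := pvChunks_take (b.toNat - 1) w.toNat (x :: t)
        rw [hkb] at this
        exact this
      have e2 : pvChunks (w.toNat - 1) (pvChunks (b.toNat - 1) ((x :: t).drop (b.toNat * w.toNat)))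
          = pvChunks (w.toNat - 1) ((pvChunks (b.toNat - 1) (x :: t)).drop w.toNat) := by
        have := pvChunks_drop (b.toNat - 1) w.toNat (x :: t)
        rw [hkb] at this
        rw [this]
      rw [e1, e2]

-- ===== VERDICT (by name: the statement is the Claim_ definition above) =====
theorem divide_list_spec : Claim_equal_divide_list := by
  intro xs b w _hDom hPre
  obtain ⟨hb, hw⟩ := hPre
  unfold Spec_divide_list
  rcases lt_trichotomy b 0 with hbneg | hb0 | hbpos
  · -- b < 0 : A's words list is empty so A = []; B's guard returns []
    have hA : divide_list xs b w = [] := by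
      simp [divide_list, pvRange_nil_of_neg hbneg (show (0:Int) ≤ (xs.length : Int) by positivity),
        pvRange_self]
    have hB : divide_list_alt xs b w = [] := by
      simp [divide_list_alt, show b ≤ 0 by omega]
    rw [hA, hB]
  · exact absurd hb0 hb
  · rcases lt_trichotomy w 0 with hwneg | hw0 | hwpos
    · -- b > 0, w < 0 : A's groups range is empty; B's guard returns []
      have hA : divide_list xs b w = [] := by
        simp [divide_list, pvRange_nil_of_neg hwneg]
      have hB : divide_list_alt xs b w = [] := by
        simp [divide_list_alt, show w ≤ 0 by omega]
      rw [hA, hB]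
    · exact absurd hw0 hw
    · rw [pvA_pos xs b w hbpos hwpos]
      unfold divide_list_alt
      rw [if_neg (by omega)]
      rw [pvAltOuter_eq b w hbpos hwpos xs.length xs le_rfl]
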